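-- pv_equiv track=rewrite | github.com/Giulia-Calia/SW_algo_implementation | Smith-Waterman_Calia_Giulia.py | connecting_tables
-- ===== SOURCE A (Python) =====
-- def connecting_tables(seqs, matrix):
--     """Provides a dictionary with the score and the relative position(s)
--         in the matrices in addiction to the maximum score of the matrix
--         and separately its position"""
--     lseq1 = len(seqs[0]) + 1
--     lseq2 = len(seqs[1]) + 1
--     score_dict = {}
--
--     for i in range(lseq1):
--         for j in range(lseq2):
--             if matrix[i][j] not in score_dict:
--                 score_dict[matrix[i][j]] = [[i,j]]
--             else:
--                 score_dict[matrix[i][j]].append([i,j])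
--
--     scores = sorted(score_dict.keys(), reverse = True)
--     score_max = max(scores)
--     pos_max = score_dict[score_max]
--
--     return score_dict, scores, score_max, pos_max
-- ===== SOURCE B (Python) =====
-- def connecting_tables(seqs, matrix):
--     """Provides a dictionary with the score and the relative position(s)
--         in the matrices in addiction to the maximum score of the matrix
--         and separately its position"""
--     h = len(seqs[0]) + 1
--     w = len(seqs[1]) + 1
--     # flat scan of the relevant sub-matrix by slicing + enumerate (no index arithmetic)
--     cells = [(v, [i, j])
--              for i, row in enumerate(matrix[:h])
--              for j, v in enumerate(row[:w])]
--     # distinct scores in first-occurrence order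
--     order = list(dict.fromkeys(v for v, _ in cells))
--     # group positions per score by filtering the flat scan
--     score_dict = {s: [p for v, p in cells if v == s] for s in order}
--     scores = sorted(order, reverse=True)
--     score_max = max(scores)
--     return score_dict, scores, score_max, score_dict[score_max]
-- ===== Notes on version B (the rewrite author's own statement) =====
-- stated objective: alternative
-- what changed: Replaces A's index loops with incremental dict mutation (insert-or-append per cell) by a slice+enumerate flat scan into (score, position) pairs, an ordered dedup of the scores, and per-score filtering of the flat list to build the groups.
import Mathlib
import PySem

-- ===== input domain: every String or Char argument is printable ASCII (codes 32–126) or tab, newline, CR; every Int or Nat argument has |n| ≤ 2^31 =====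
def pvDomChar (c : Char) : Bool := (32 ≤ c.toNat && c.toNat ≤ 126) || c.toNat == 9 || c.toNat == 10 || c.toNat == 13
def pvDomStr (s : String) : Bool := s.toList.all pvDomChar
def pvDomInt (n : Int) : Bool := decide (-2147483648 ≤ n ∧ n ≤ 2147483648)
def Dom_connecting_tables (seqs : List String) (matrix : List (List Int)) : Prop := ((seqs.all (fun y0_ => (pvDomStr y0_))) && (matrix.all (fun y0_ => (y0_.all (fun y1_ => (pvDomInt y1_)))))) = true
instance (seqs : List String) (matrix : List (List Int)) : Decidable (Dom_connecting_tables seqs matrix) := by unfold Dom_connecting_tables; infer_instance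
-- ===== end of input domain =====

-- B groups positions by a slice+enumerate flat scan, ordered dedup of the scores and
-- per-score filtering, instead of A's index loops mutating a dict cell by cell;
-- same return value (objective: alternative decomposition, no speed claim).

-- ===== PORT A =====
def connecting_tables (seqs : List String) (matrix : List (List Int)) : (List (Int × List (List Int))) × List Int × Int × List (List Int) :=
  let lseq1 : Int := PySem.Str.len (PySem.List.pyGetD seqs 0 "") + 1
  let lseq2 : Int := PySem.Str.len (PySem.List.pyGetD seqs 1 "") + 1
  let score_dict : PySem.Dict Int (List (List Int)) :=
    (PySem.List.pyRange 0 lseq1 1).foldl (fun d i =>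
      (PySem.List.pyRange 0 lseq2 1).foldl (fun d j =>
        if d.contains (PySem.List.pyGetD (PySem.List.pyGetD matrix i []) j 0) = false then
          d.insert (PySem.List.pyGetD (PySem.List.pyGetD matrix i []) j 0) [[i, j]]
        else
          d.modify (PySem.List.pyGetD (PySem.List.pyGetD matrix i []) j 0) [] (fun l => l ++ [[i, j]])) d)
      PySem.Dict.empty
  let scores : List Int := PySem.List.sorted score_dict.keys (fun x => x) true
  -- scores is never empty (the loop always runs ≥ 1 iteration), so Python's max() never raises; the getD default is unreachable
  let score_max : Int := (PySem.List.max? scores (fun x => x)).getD 0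
  let pos_max : List (List Int) := (score_dict.get? score_max).getD []
  (score_dict.items, scores, score_max, pos_max)

-- ===== PORT B =====
def connecting_tables_alt (seqs : List String) (matrix : List (List Int)) : (List (Int × List (List Int))) × List Int × Int × List (List Int) :=
  let h : Int := PySem.Str.len (PySem.List.pyGetD seqs 0 "") + 1
  let w : Int := PySem.Str.len (PySem.List.pyGetD seqs 1 "") + 1
  let cells : List (Int × List Int) :=
    (PySem.List.enumerate (PySem.List.slice matrix none (some h))).flatMap (fun p =>
      (PySem.List.enumerate (PySem.List.slice p.2 none (some w))).map (fun q =>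
        (q.2, [p.1, q.1])))
  let order : List Int := PySem.List.dedup (cells.map (·.1))
  let score_dict : List (Int × List (List Int)) :=
    order.map (fun s => (s, (cells.filter (fun c => c.1 == s)).map (·.2)))
  let scores : List Int := PySem.List.sorted order (fun x => x) true
  let score_max : Int := (PySem.List.max? scores (fun x => x)).getD 0
  let pos_max : List (List Int) := ((PySem.Dict.mk score_dict).get? score_max).getD []
  (score_dict, scores, score_max, pos_max)

-- ===== PRECONDITION & SPEC =====
-- Pre_ excludes exactly the IndexErrors: Python A reads seqs[0], seqs[1] and matrix[i][j]
-- for all 0 ≤ i ≤ len(seqs[0]), 0 ≤ j ≤ len(seqs[1]).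
def Pre_connecting_tables (seqs : List String) (matrix : List (List Int)) : Prop :=
  2 ≤ seqs.length ∧
  (seqs.getD 0 "").toList.length + 1 ≤ matrix.length ∧
  ∀ r ∈ matrix.take ((seqs.getD 0 "").toList.length + 1),
    (seqs.getD 1 "").toList.length + 1 ≤ r.length
instance (seqs : List String) (matrix : List (List Int)) : Decidable (Pre_connecting_tables seqs matrix) := by unfold Pre_connecting_tables; infer_instance

def pvWitness_connecting_tables : List String × List (List Int) := (["a", "b"], [[1, 0], [0, 2]])

def Spec_connecting_tables (seqs : List String) (matrix : List (List Int)) (out : (List (Int × List (List Int))) × List Int × Int × List (List Int)) : Prop := out = connecting_tables_alt seqs matrix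
instance (seqs : List String) (matrix : List (List Int)) (out : (List (Int × List (List Int))) × List Int × Int × List (List Int)) : Decidable (Spec_connecting_tables seqs matrix out) := by unfold Spec_connecting_tables; infer_instance

-- ===== CLAIM (what is proved, stated in full; the proofs are below) =====
def Claim_equal_connecting_tables : Prop := ∀ (seqs : List String) (matrix : List (List Int)), Dom_connecting_tables seqs matrix → Pre_connecting_tables seqs matrix → Spec_connecting_tables seqs matrix (connecting_tables seqs matrix)

-- ===== LEMMAS AND PROOFS =====

-- A's loop body, on a flat (score, position) pair
def pvStep (d : PySem.Dict Int (List (List Int))) (q : Int × List Int) : PySem.Dict Int (List (List Int)) :=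
  if d.contains q.1 = false then d.insert q.1 [q.2] else d.modify q.1 [] (fun l => l ++ [q.2])

-- B's group of positions carrying score s
def pvGroup (ps : List (Int × List Int)) (s : Int) : List (List Int) :=
  (ps.filter (fun q => q.1 == s)).map (·.2)

lemma pvDedup_append_singleton (xs : List Int) (v : Int) :
    PySem.List.dedup (xs ++ [v]) =
      if v ∈ PySem.List.dedup xs then PySem.List.dedup xs else PySem.List.dedup xs ++ [v] := by
  simp only [PySem.List.dedup_eq_ofList, PySem.Set.ofList_eq_foldl, List.foldl_append,
    List.foldl_cons, List.foldl_nil]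
  rw [← PySem.Set.ofList_eq_foldl, PySem.Set.add_eq_ite]

lemma pvGroup_append_singleton (l : List (Int × List Int)) (q : Int × List Int) (s : Int) :
    pvGroup (l ++ [q]) s = pvGroup l s ++ (if q.1 == s then [q.2] else []) := by
  simp only [pvGroup, List.filter_append, List.map_append, List.filter_cons, List.filter_nil]
  split <;> simp

-- the heart: A's dict loop, run over the flat pair list, produces exactly B's grouped items
lemma pvFold_items (ps : List (Int × List Int)) :
    (ps.foldl pvStep PySem.Dict.empty).items
      = (PySem.List.dedup (ps.map (·.1))).map (fun s => (s, pvGroup ps s)) := by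
  induction ps using List.reverseRecOn with
  | nil => rfl
  | append_singleton l q ih =>
    rw [List.foldl_append, List.foldl_cons, List.foldl_nil]
    have hkeys : (l.foldl pvStep PySem.Dict.empty).keys = PySem.List.dedup (l.map (·.1)) := by
      show (l.foldl pvStep PySem.Dict.empty).items.map (·.1) = _
      rw [ih, List.map_map]; exact List.map_id _
    have hnodup : (l.foldl pvStep PySem.Dict.empty).keys.Nodup := by
      rw [hkeys, PySem.List.dedup_eq_ofList]; exact PySem.Set.nodup_ofList _
    have hmapfst : (l ++ [q]).map (·.1) = l.map (·.1) ++ [q.1] := by simp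
    by_cases hc : q.1 ∈ l.map (·.1)
    · -- score already present: A appends to the existing entry
      have hcon : (l.foldl pvStep PySem.Dict.empty).contains q.1 = true := by
        rw [PySem.Dict.contains_iff_mem_keys, hkeys, PySem.List.dedup_eq_ofList]
        exact (PySem.Set.mem_ofList _ _).2 hc
      have hstep : pvStep (l.foldl pvStep PySem.Dict.empty) q
          = (l.foldl pvStep PySem.Dict.empty).modify q.1 [] (fun t => t ++ [q.2]) := by
        simp [pvStep, hcon]
      have hded : PySem.List.dedup ((l ++ [q]).map (·.1)) = PySem.List.dedup (l.map (·.1)) := by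
        rw [hmapfst, pvDedup_append_singleton]
        simp [PySem.List.dedup_eq_ofList, PySem.Set.mem_ofList, hc]
      have hkeys' : ((l.foldl pvStep PySem.Dict.empty).modify q.1 [] (fun t => t ++ [q.2])).keys
          = (l.foldl pvStep PySem.Dict.empty).keys := by
        rw [PySem.Dict.keys_modify, PySem.Dict.keys_insert_of_contains _ _ hcon]
      rw [hstep, PySem.Dict.items_eq_map_keys _ (by rw [hkeys']; exact hnodup) [], hkeys', hkeys, hded]
      apply List.map_congr_left
      intro s hs
      have hgetD : ∀ t ∈ PySem.List.dedup (l.map (·.1)),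
          (l.foldl pvStep PySem.Dict.empty).getD t [] = pvGroup l t := by
        intro t ht
        exact PySem.Dict.getD_of_mem_items _ (by rw [ih]; exact List.mem_map_of_mem ht) hnodup []
      rw [PySem.Dict.getD_modify, pvGroup_append_singleton]
      by_cases hsq : s = q.1
      · subst hsq
        simp [hgetD q.1 hs]
      · have : ¬ (q.1 == s) = true := by simp [Ne.symm hsq]
        simp [hsq, this, hgetD s hs]
    · -- fresh score: A appends a new entry at the end
      have hcon : (l.foldl pvStep PySem.Dict.empty).contains q.1 = false := by
        rw [← Bool.not_eq_true, PySem.Dict.contains_iff_mem_keys, hkeys, PySem.List.dedup_eq_ofList]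
        simp [PySem.Set.mem_ofList, hc]
      have hstep : pvStep (l.foldl pvStep PySem.Dict.empty) q
          = (l.foldl pvStep PySem.Dict.empty).insert q.1 [q.2] := by
        simp [pvStep, hcon]
      have hded : PySem.List.dedup ((l ++ [q]).map (·.1))
          = PySem.List.dedup (l.map (·.1)) ++ [q.1] := by
        rw [hmapfst, pvDedup_append_singleton]
        simp [PySem.List.dedup_eq_ofList, PySem.Set.mem_ofList, hc]
      rw [hstep, PySem.Dict.items_insert_of_not_contains _ _ hcon, ih, hded, List.map_append]
      congr 1
      · apply List.map_congr_left
        intro s hs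
        have hsmem : s ∈ l.map (·.1) := by
          rw [PySem.List.dedup_eq_ofList] at hs
          exact (PySem.Set.mem_ofList _ _).1 hs
        have hsq : ¬ (q.1 == s) = true := by
          simp only [beq_iff_eq]
          rintro rfl
          exact hc hsmem
        rw [pvGroup_append_singleton]
        simp [hsq]
      · have hempty : pvGroup l q.1 = [] := by
          simp only [pvGroup, List.map_eq_nil_iff, List.filter_eq_nil_iff]
          intro a ha
          simp only [beq_iff_eq]
          intro h
          exact hc (h ▸ List.mem_map_of_mem ha)
        simp [pvGroup_append_singleton, hempty]

-- enumerate over a truncated list is the indexed scan over the untruncated one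
lemma pvEnumerate_take {α : Type} (xs : List α) (n : Int) (d : α)
    (h0 : 0 ≤ n) (hn : n.toNat ≤ xs.length) :
    PySem.List.enumerate (PySem.List.slice xs none (some n))
      = (PySem.List.pyRange 0 n 1).map (fun j => (j, PySem.List.pyGetD xs j d)) := by
  rw [PySem.List.slice_to _ h0, PySem.List.enumerate_eq_map_pyRange _ d]
  have hlen : PySem.List.len (xs.take n.toNat) = n := by
    simp [PySem.List.len, List.length_take, Nat.min_eq_left hn, Int.toNat_of_nonneg h0]
  rw [hlen]
  apply List.map_congr_left
  intro j hj
  obtain ⟨h1, h2⟩ := (PySem.List.mem_pyRange_one).1 hj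
  obtain ⟨k, rfl⟩ := Int.eq_ofNat_of_zero_le h1
  have hk : k < n.toNat := by omega
  simp only [PySem.List.pyGetD_natCast]
  congr 1
  simp [List.getD_eq_getElem?_getD, hk]

-- ===== VERDICT (by name: the statement is the Claim_ definition above) =====
theorem connecting_tables_spec : Claim_equal_connecting_tables := by
  intro seqs matrix _ hpre
  obtain ⟨hlen2, hrows, hcols⟩ := hpre
  unfold Spec_connecting_tables connecting_tables connecting_tables_alt
  set h : Int := PySem.Str.len (PySem.List.pyGetD seqs 0 "") + 1 with hh
  set w : Int := PySem.Str.len (PySem.List.pyGetD seqs 1 "") + 1 with hw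
  set ps : List (Int × List Int) :=
    (PySem.List.pyRange 0 h 1).flatMap (fun i =>
      (PySem.List.pyRange 0 w 1).map (fun j =>
        (PySem.List.pyGetD (PySem.List.pyGetD matrix i []) j 0, [i, j]))) with hps
  -- index facts
  have hget0 : PySem.List.pyGetD seqs 0 "" = seqs.getD 0 "" := by
    exact_mod_cast PySem.List.pyGetD_natCast seqs 0 ""
  have hget1 : PySem.List.pyGetD seqs 1 "" = seqs.getD 1 "" := by
    exact_mod_cast PySem.List.pyGetD_natCast seqs 1 ""
  have hhval : h = ((seqs.getD 0 "").toList.length : Int) + 1 := by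
    rw [hh, hget0, PySem.Str.len_eq]
  have hwval : w = ((seqs.getD 1 "").toList.length : Int) + 1 := by
    rw [hw, hget1, PySem.Str.len_eq]
  have hh0 : 0 ≤ h := by rw [hhval]; positivity
  have hw0 : 0 ≤ w := by rw [hwval]; positivity
  have hhnat : h.toNat ≤ matrix.length := by omega
  -- B's flat scan equals A's indexed scan
  have hB :
      (PySem.List.enumerate (PySem.List.slice matrix none (some h))).flatMap (fun p =>
        (PySem.List.enumerate (PySem.List.slice p.2 none (some w))).map (fun q =>
          (q.2, [p.1, q.1]))) = ps := by
    rw [pvEnumerate_take matrix h ([] : List Int) hh0 hhnat, hps, List.flatMap_map]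
    apply List.flatMap_congr
    intro i hi
    obtain ⟨hi1, hi2⟩ := (PySem.List.mem_pyRange_one).1 hi
    obtain ⟨k, rfl⟩ := Int.eq_ofNat_of_zero_le hi1
    have hrow : PySem.List.pyGetD matrix (k : Int) [] ∈ matrix.take h.toNat := by
      rw [PySem.List.pyGetD_natCast]
      have hk : k < matrix.length := by omega
      have hk' : k < h.toNat := by omega
      rw [List.getD_eq_getElem?_getD, List.getElem?_eq_getElem hk]
      exact List.mem_take_iff_getElem.2 ⟨k, by omega, by simp⟩
    have hrow' : PySem.List.pyGetD matrix (k : Int) []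
        ∈ matrix.take ((seqs.getD 0 "").toList.length + 1) := by
      rwa [show h.toNat = (seqs.getD 0 "").toList.length + 1 by omega] at hrow
    have hwnat : w.toNat ≤ (PySem.List.pyGetD matrix (k : Int) []).length := by
      have := hcols _ hrow'
      omega
    rw [pvEnumerate_take _ w 0 hw0 hwnat, List.map_map]
    rfl
  simp only [hB]
  have hA :
      (PySem.List.pyRange 0 h 1).foldl (fun d i =>
        (PySem.List.pyRange 0 w 1).foldl (fun d j =>
          if d.contains (PySem.List.pyGetD (PySem.List.pyGetD matrix i []) j 0) = false then
            d.insert (PySem.List.pyGetD (PySem.List.pyGetD matrix i []) j 0) [[i, j]]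
          else
            d.modify (PySem.List.pyGetD (PySem.List.pyGetD matrix i []) j 0) [] (fun l => l ++ [[i, j]])) d)
        PySem.Dict.empty
      = ps.foldl pvStep PySem.Dict.empty := by
    rw [hps, List.foldl_flatMap]
    simp only [List.foldl_map]
    rfl
  simp only [hA]
  have hitems' : (ps.foldl pvStep PySem.Dict.empty).items
      = (PySem.List.dedup (ps.map (·.1))).map
          (fun s => (s, (ps.filter (fun q => q.1 == s)).map (·.2))) := pvFold_items ps
  have hkeys : (ps.foldl pvStep PySem.Dict.empty).keys = PySem.List.dedup (ps.map (·.1)) := by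
    show (ps.foldl pvStep PySem.Dict.empty).items.map (·.1) = _
    rw [pvFold_items ps, List.map_map]; exact List.map_id _
  rw [Prod.ext_iff, Prod.ext_iff, Prod.ext_iff]
  refine ⟨hitems', by rw [hkeys], by rw [hkeys], ?_⟩
  rw [hkeys, ← hitems']
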